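-- pv_equiv track=rewrite | github.com/LeilaMoussa/problem-solving | student_heights.py | increasingRowCount1
-- ===== SOURCE A (Python) =====
-- from collections import defaultdict
--
-- def increasingRowCount1(a: list) -> int:
--     if len(a) == 0:
--         return 0
--
--     row_shortest = defaultdict(lambda: 10001)  # To keep track of the shortest in each row.
--     rows = 1  # There's at least one row, created by the first student.
--
--     row_shortest[1] = a[0]
--     a = a[1:]
--
--     for i, height in enumerate(a):
--         # Student creates a new row if they can't be the shortest in any of the existing rows
--         # If they encounter at least one person taller than them, they join that row
--         # If they are taller than all the shortest people, they must create a new row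
--         joined = False
--         for item in row_shortest.items():
--             if item[1] > height:
--                 # join the row, don't increment
--                 joined = True
--                 break
--         if not joined:
--             rows += 1
--             row_shortest[rows] = height
--
--     return rows
-- ===== SOURCE B (Python) =====
-- def increasingRowCount1(a: list) -> int:
--     # Single pass: a student starts a new row iff their height >= the running
--     # maximum of all previous new-row heights.
--     if not a:
--         return 0
--     rows = 1
--     m = a[0]
--     for h in a[1:]:
--         if h >= m:
--             rows += 1
--             m = h
--     return rows
-- ===== Notes on version B (the rewrite author's own statement) =====
-- stated objective: faster
-- what changed: Replaced the dict of per-row 'shortest' values and the inner scan over all rows by a single pass tracking the running maximum of new-row heights (A never updates a row's shortest, so the scan reduces to a comparison with that maximum).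
import Mathlib
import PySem

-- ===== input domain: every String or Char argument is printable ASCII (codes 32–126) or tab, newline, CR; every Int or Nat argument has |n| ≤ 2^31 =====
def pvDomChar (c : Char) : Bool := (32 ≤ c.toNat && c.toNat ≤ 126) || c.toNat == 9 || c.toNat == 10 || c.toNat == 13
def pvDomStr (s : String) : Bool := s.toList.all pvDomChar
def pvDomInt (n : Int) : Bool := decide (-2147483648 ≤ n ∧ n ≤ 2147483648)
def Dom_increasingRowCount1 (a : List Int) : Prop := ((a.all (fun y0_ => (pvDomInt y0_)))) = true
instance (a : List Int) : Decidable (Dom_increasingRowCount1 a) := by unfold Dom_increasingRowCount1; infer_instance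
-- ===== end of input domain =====

-- B replaces A's dict of per-row shortest heights (scanned in full for every
-- student) by a single pass with a running maximum: O(n) instead of O(n^2).

-- ===== PORT A =====
-- A's loop state: (row_shortest dict, rows); the inner for-with-break over
-- row_shortest.items() is the first-match existence test `.any`.
def increasingRowCount1 (a : List Int) : Int :=
  match a with
  | [] => 0
  | h :: rest =>
    let init : PySem.Dict Int Int := PySem.Dict.empty.insert 1 h
    (rest.foldl
      (fun (s : PySem.Dict Int Int × Int) height =>
        let joined := s.1.items.any (fun item => item.2 > height)
        if joined then s
        else (s.1.insert (s.2 + 1) height, s.2 + 1))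
      (init, 1)).2

-- ===== PORT B =====
def increasingRowCount1_alt (a : List Int) : Int :=
  match a with
  | [] => 0
  | h :: rest =>
    (rest.foldl
      (fun (s : Int × Int) x => if x ≥ s.2 then (s.1 + 1, x) else s)
      (1, h)).1

-- ===== PRECONDITION & SPEC =====
def Spec_increasingRowCount1 (a : List Int) (out : Int) : Prop := out = increasingRowCount1_alt a
instance (a : List Int) (out : Int) : Decidable (Spec_increasingRowCount1 a out) := by unfold Spec_increasingRowCount1; infer_instance

-- ===== CLAIM (what is proved, stated in full; the proofs are below) =====
def Claim_equal_increasingRowCount1 : Prop := ∀ (a : List Int), Dom_increasingRowCount1 a → Spec_increasingRowCount1 a (increasingRowCount1 a)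

-- ===== LEMMAS AND PROOFS =====

-- Invariant: all values in the dict are ≤ m, m occurs as a value, and all keys
-- are ≤ rows (so key rows+1 is fresh); then A's fold and B's fold agree.
theorem pv_loop_eq (rest : List Int) (d : PySem.Dict Int Int) (rows m : Int)
    (hle : ∀ p ∈ d.items, p.2 ≤ m) (hmem : ∃ p ∈ d.items, p.2 = m)
    (hkeys : ∀ p ∈ d.items, p.1 ≤ rows) :
    (rest.foldl
      (fun (s : PySem.Dict Int Int × Int) height =>
        let joined := s.1.items.any (fun item => item.2 > height)
        if joined then s
        else (s.1.insert (s.2 + 1) height, s.2 + 1))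
      (d, rows)).2
    = (rest.foldl
      (fun (s : Int × Int) x => if x ≥ s.2 then (s.1 + 1, x) else s)
      (rows, m)).1 := by
  induction rest generalizing d rows m with
  | nil => rfl
  | cons x t ih =>
    simp only [List.foldl_cons]
    by_cases hx : x ≥ m
    · have hany : (d.items.any (fun item => item.2 > x)) = false := by
        simp only [List.any_eq_false, decide_eq_true_eq]
        intro p hp
        have := hle p hp
        omega
      have hfresh : d.contains (rows + 1) = false := by
        rw [PySem.Dict.contains_eq_decide_mem_keys]
        simp only [decide_eq_false_iff_not, PySem.Dict.keys, List.mem_map]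
        rintro ⟨p, hp, hpk⟩
        have := hkeys p hp
        omega
      have hitems := PySem.Dict.items_insert_of_not_contains (d := d)
        (k := rows + 1) (v := x) hfresh
      simp only [hany, if_pos hx]
      simp only [Bool.false_eq_true, if_false]
      apply ih
      · intro p hp
        rw [hitems] at hp
        rcases List.mem_append.mp hp with hp | hp
        · have := hle p hp; omega
        · obtain rfl : p = (rows + 1, x) := by simpa using hp
          omega
      · refine ⟨(rows + 1, x), ?_, rfl⟩
        rw [hitems]; simp
      · intro p hp
        rw [hitems] at hp
        rcases List.mem_append.mp hp with hp | hp
        · have := hkeys p hp; omega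
        · obtain rfl : p = (rows + 1, x) := by simpa using hp
          omega
    · obtain ⟨p, hp, hpm⟩ := hmem
      have hany : (d.items.any (fun item => item.2 > x)) = true := by
        simp only [List.any_eq_true, decide_eq_true_eq]
        exact ⟨p, hp, by omega⟩
      simp only [hany, if_neg hx, if_true]
      exact ih d rows m hle ⟨p, hp, hpm⟩ hkeys

-- ===== VERDICT (by name: the statement is the Claim_ definition above) =====
theorem increasingRowCount1_spec : Claim_equal_increasingRowCount1 := by
  intro a _
  unfold Spec_increasingRowCount1 increasingRowCount1 increasingRowCount1_alt
  match a with
  | [] => rfl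
  | h :: rest =>
    have hinit : (PySem.Dict.empty.insert 1 h : PySem.Dict Int Int).items = [(1, h)] := rfl
    apply pv_loop_eq
    · intro p hp; rw [hinit] at hp
      obtain rfl : p = (1, h) := by simpa using hp
      exact le_refl _
    · exact ⟨(1, h), by rw [hinit]; simp, rfl⟩
    · intro p hp; rw [hinit] at hp
      obtain rfl : p = (1, h) := by simpa using hp
      exact le_refl _
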